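-- pv_equiv track=rewrite | github.com/DestinyAzriel/AegisAI | cloud/api/dashboard_api.py | _calculate_threat_distribution
-- ===== SOURCE A (Python) =====
-- from typing import Dict, List, Any, Optional
--
-- def _calculate_threat_distribution(agents: List[Dict]) -> Dict[str, int]:
--     """Calculate threat distribution across endpoints"""
--     threat_dist = {"clean": 0, "low": 0, "medium": 0, "high": 0, "critical": 0}
--     for agent in agents:
--         threats = agent.get("threats_detected", 0)
--         if threats == 0:
--             threat_dist["clean"] += 1
--         elif threats <= 2:
--             threat_dist["low"] += 1
--         elif threats <= 5:
--             threat_dist["medium"] += 1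
--         elif threats <= 10:
--             threat_dist["high"] += 1
--         else:
--             threat_dist["critical"] += 1
--     return threat_dist
-- ===== SOURCE B (Python) =====
-- def _calculate_threat_distribution(agents):
--     """Calculate threat distribution across endpoints"""
--     ts = [agent.get("threats_detected", 0) for agent in agents]
--     zeros = ts.count(0)
--     le2 = sum(1 for t in ts if t <= 2)
--     le5 = sum(1 for t in ts if t <= 5)
--     le10 = sum(1 for t in ts if t <= 10)
--     return {"clean": zeros, "low": le2 - zeros, "medium": le5 - le2,
--             "high": le10 - le5, "critical": len(ts) - le10}
-- ===== Notes on version B (the rewrite author's own statement) =====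
-- stated objective: alternative
-- what changed: Replaces the per-agent if/elif classification into a mutable dict with staged counting: extract the threat list once, take cumulative threshold counts (count of zeros, of <=2, <=5, <=10) in separate passes, and obtain each bucket as the difference of adjacent cumulative counts.
import Mathlib
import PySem

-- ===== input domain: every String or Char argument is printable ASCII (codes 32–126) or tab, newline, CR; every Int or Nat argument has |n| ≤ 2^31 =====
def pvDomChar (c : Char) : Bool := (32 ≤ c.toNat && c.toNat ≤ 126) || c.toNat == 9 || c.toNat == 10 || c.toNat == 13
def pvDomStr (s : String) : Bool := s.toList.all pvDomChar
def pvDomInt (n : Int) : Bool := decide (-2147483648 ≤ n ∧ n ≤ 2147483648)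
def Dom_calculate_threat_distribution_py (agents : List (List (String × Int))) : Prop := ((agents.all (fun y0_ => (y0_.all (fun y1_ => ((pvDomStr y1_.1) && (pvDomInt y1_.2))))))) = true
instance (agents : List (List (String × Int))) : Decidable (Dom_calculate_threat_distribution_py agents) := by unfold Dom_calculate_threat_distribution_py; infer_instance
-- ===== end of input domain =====

-- B replaces A's per-element if/elif classification by staged cumulative threshold counts whose adjacent differences give the buckets (alternative decomposition, same cost).


-- ===== PORT A =====
-- literal transliteration of A: a five-key dict, then an if/elif chain incrementing one key per agent
def calculate_threat_distribution_py (agents : List (List (String × Int))) : List (String × Int) :=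
  let threat_dist : PySem.Dict String Int :=
    PySem.Dict.ofList [("clean", 0), ("low", 0), ("medium", 0), ("high", 0), ("critical", 0)]
  let threat_dist := agents.foldl (fun threat_dist agent =>
    let threats := (PySem.Dict.mk agent).getD "threats_detected" 0
    if threats = 0 then threat_dist.insert "clean" (threat_dist.getD "clean" 0 + 1)
    else if threats ≤ 2 then threat_dist.insert "low" (threat_dist.getD "low" 0 + 1)
    else if threats ≤ 5 then threat_dist.insert "medium" (threat_dist.getD "medium" 0 + 1)
    else if threats ≤ 10 then threat_dist.insert "high" (threat_dist.getD "high" 0 + 1)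
    else threat_dist.insert "critical" (threat_dist.getD "critical" 0 + 1)) threat_dist
  threat_dist.items

-- ===== PORT B =====
-- literal transliteration of B: extract ts, staged cumulative counts, buckets as differences
def calculate_threat_distribution_py_alt (agents : List (List (String × Int))) : List (String × Int) :=
  let ts : List Int := agents.map (fun agent => (PySem.Dict.mk agent).getD "threats_detected" 0)
  let zeros : Int := ts.count 0
  let le2 : Int := ts.countP (fun t => t ≤ 2)
  let le5 : Int := ts.countP (fun t => t ≤ 5)
  let le10 : Int := ts.countP (fun t => t ≤ 10)
  [("clean", zeros), ("low", le2 - zeros), ("medium", le5 - le2),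
   ("high", le10 - le5), ("critical", (ts.length : Int) - le10)]

-- ===== PRECONDITION & SPEC =====
def Spec_calculate_threat_distribution_py (agents : List (List (String × Int))) (out : List (String × Int)) : Prop := out = calculate_threat_distribution_py_alt agents
instance (agents : List (List (String × Int))) (out : List (String × Int)) : Decidable (Spec_calculate_threat_distribution_py agents out) := by unfold Spec_calculate_threat_distribution_py; infer_instance

-- ===== CLAIM (what is proved, stated in full; the proofs are below) =====
def Claim_equal_calculate_threat_distribution_py : Prop := ∀ (agents : List (List (String × Int))), Dom_calculate_threat_distribution_py agents → Spec_calculate_threat_distribution_py agents (calculate_threat_distribution_py agents)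

-- ===== LEMMAS AND PROOFS =====

-- A's loop from a general five-count state, characterised by B's cumulative counts
theorem td_loop_eq (agents : List (List (String × Int))) : ∀ (a b c d e : Int),
    (agents.foldl (fun threat_dist agent =>
      let threats := (PySem.Dict.mk agent).getD "threats_detected" 0
      if threats = 0 then threat_dist.insert "clean" (threat_dist.getD "clean" 0 + 1)
      else if threats ≤ 2 then threat_dist.insert "low" (threat_dist.getD "low" 0 + 1)
      else if threats ≤ 5 then threat_dist.insert "medium" (threat_dist.getD "medium" 0 + 1)
      else if threats ≤ 10 then threat_dist.insert "high" (threat_dist.getD "high" 0 + 1)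
      else threat_dist.insert "critical" (threat_dist.getD "critical" 0 + 1))
      (PySem.Dict.mk [("clean", a), ("low", b), ("medium", c), ("high", d), ("critical", e)])).items
    = (let ts : List Int := agents.map (fun agent => (PySem.Dict.mk agent).getD "threats_detected" 0)
       [("clean", a + (ts.count 0 : Int)),
        ("low", b + ((ts.countP (fun t => t ≤ 2) : Int) - (ts.count 0 : Int))),
        ("medium", c + ((ts.countP (fun t => t ≤ 5) : Int) - (ts.countP (fun t => t ≤ 2) : Int))),
        ("high", d + ((ts.countP (fun t => t ≤ 10) : Int) - (ts.countP (fun t => t ≤ 5) : Int))),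
        ("critical", e + ((ts.length : Int) - (ts.countP (fun t => t ≤ 10) : Int)))]) := by
  induction agents with
  | nil => intro a b c d e; simp
  | cons agent rest ih =>
    intro a b c d e
    simp only [List.foldl_cons, List.map_cons, List.count_cons, List.countP_cons,
      List.length_cons]
    set t := (PySem.Dict.mk agent).getD "threats_detected" 0 with ht
    by_cases h0 : t = 0
    · have h := ih (a + 1) b c d e
      simp [h0, PySem.Dict.insert, PySem.Dict.getD, PySem.Dict.get?, PySem.Dict.contains] at h ⊢
      rw [h]
      simp only [List.cons.injEq, Prod.mk.injEq, and_true, true_and]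
      omega
    · by_cases h2 : t ≤ 2
      · have h := ih a (b + 1) c d e
        simp [h0, h2, PySem.Dict.insert, PySem.Dict.getD, PySem.Dict.get?, PySem.Dict.contains] at h ⊢
        rw [h]
        simp only [List.cons.injEq, Prod.mk.injEq, and_true, true_and]
        omega
      · by_cases h5 : t ≤ 5
        · have h := ih a b (c + 1) d e
          simp [h0, h2, h5, show t ≤ 10 by omega, PySem.Dict.insert, PySem.Dict.getD, PySem.Dict.get?, PySem.Dict.contains] at h ⊢
          rw [h]
          simp only [List.cons.injEq, Prod.mk.injEq, and_true, true_and]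
          omega
        · by_cases h10 : t ≤ 10
          · have h := ih a b c (d + 1) e
            simp [h0, h2, h5, h10, PySem.Dict.insert, PySem.Dict.getD, PySem.Dict.get?, PySem.Dict.contains] at h ⊢
            rw [h]
            simp only [List.cons.injEq, Prod.mk.injEq, and_true, true_and]
            omega
          · have h := ih a b c d (e + 1)
            simp [h0, h2, h5, h10, PySem.Dict.insert, PySem.Dict.getD, PySem.Dict.get?, PySem.Dict.contains] at h ⊢
            rw [h]
            simp only [List.cons.injEq, Prod.mk.injEq, and_true, true_and]
            omega

-- ===== VERDICT (by name: the statement is the Claim_ definition above) =====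
theorem calculate_threat_distribution_py_spec : Claim_equal_calculate_threat_distribution_py := by
  intro agents _
  unfold Spec_calculate_threat_distribution_py
  unfold calculate_threat_distribution_py calculate_threat_distribution_py_alt
  simpa using td_loop_eq agents 0 0 0 0 0
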